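-- pv_equiv track=rewrite | github.com/chyanju/Trinity-Edge | trinity/interpreter/morpheus_fine_abstract.py | fast_validate_collist
-- ===== SOURCE A (Python) =====
-- def fast_validate_collist(arg_collist):
--     # arg_collist is the original collist (before explanation)
--
--     if len(arg_collist) != len(list(set(arg_collist))):
--         # don't include duplicates
--         # e.g., -1, -1, will cause ValueError in .remove(x) in explain_collist
--         return False
--
--     # note-important: don't mix positive and negative ints
--     if max(arg_collist) >= 0 and min(arg_collist) < 0:
--         return False
--
--     for p in arg_collist:
--         if p == 0:
--             if -99 in arg_collist:
--                 return False
--             else: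
--                 continue
--         elif p == -99:
--             if 0 in arg_collist:
--                 return False
--             else:
--                 continue
--         elif p > 0:
--             if -p in arg_collist:
--                 return False
--             else:
--                 continue
--         elif p < 0:
--             if -p in arg_collist:
--                 return False
--             else:
--                 continue
--
--     return True
-- ===== SOURCE B (Python) =====
-- def fast_validate_collist(arg_collist):
--     # The per-element complement loop in the original is dead code: any
--     # complementary pair (p/-p or 0/-99) puts both a nonnegative and a
--     # negative value in the list, which the sign-mix guard already rejects.
--     if len(arg_collist) != len(set(arg_collist)):
--         return False
--     return not (max(arg_collist) >= 0 and min(arg_collist) < 0)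
-- ===== Notes on version B (the rewrite author's own statement) =====
-- stated objective: simpler
-- what changed: B drops A's whole per-element complement-pair loop after proving it is dead code (any complementary pair already trips the sign-mix max/min guard), keeping only the duplicate check and the sign-mix check.
import Mathlib
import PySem

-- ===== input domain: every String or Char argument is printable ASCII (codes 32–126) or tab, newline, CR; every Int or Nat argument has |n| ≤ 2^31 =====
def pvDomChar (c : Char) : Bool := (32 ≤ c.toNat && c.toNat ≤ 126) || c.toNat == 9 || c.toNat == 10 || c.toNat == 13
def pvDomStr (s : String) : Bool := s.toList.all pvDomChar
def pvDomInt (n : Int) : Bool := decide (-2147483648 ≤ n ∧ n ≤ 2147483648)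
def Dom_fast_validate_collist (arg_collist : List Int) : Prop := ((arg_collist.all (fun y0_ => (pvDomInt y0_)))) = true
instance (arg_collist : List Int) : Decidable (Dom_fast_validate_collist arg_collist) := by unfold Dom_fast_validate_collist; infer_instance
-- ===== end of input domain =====

-- B = A with the dead per-element complement loop removed (any complementary pair already
-- trips the sign-mix max/min guard); objective: simpler.

-- ===== PORT A =====
-- the 'for p in arg_collist' complement loop, transliterated branch by branch
def pvLoopA (allv : List Int) : List Int → Bool
  | [] => true
  | p :: rest =>
    if p = 0 then
      (if (-99 : Int) ∈ allv then false else pvLoopA allv rest)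
    else if p = -99 then
      (if (0 : Int) ∈ allv then false else pvLoopA allv rest)
    else if p > 0 then
      (if (-p) ∈ allv then false else pvLoopA allv rest)
    else if p < 0 then
      (if (-p) ∈ allv then false else pvLoopA allv rest)
    else pvLoopA allv rest

def fast_validate_collist (arg_collist : List Int) : Bool :=
  if arg_collist.length ≠ (PySem.Set.ofList arg_collist).length then false
  else
    match PySem.List.max? arg_collist (fun x => x), PySem.List.min? arg_collist (fun x => x) with
    | some mx, some mn =>
        if mx ≥ 0 ∧ mn < 0 then false
        else pvLoopA arg_collist arg_collist
    | _, _ => false  -- empty list: Python raises ValueError (outside Pre_)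

-- ===== PORT B =====
def fast_validate_collist_alt (arg_collist : List Int) : Bool :=
  if arg_collist.length ≠ (PySem.Set.ofList arg_collist).length then false
  else
    match PySem.List.max? arg_collist (fun x => x) with
    | none => false  -- empty list: Python raises ValueError (outside Pre_)
    | some mx =>
      match PySem.List.min? arg_collist (fun x => x) with
      | none => false
      | some mn => !(decide (mx ≥ 0) && decide (mn < 0))

-- ===== PRECONDITION & SPEC =====
-- Pre_ excludes only the empty list, on which Python's max() raises ValueError in both A and B.
def Pre_fast_validate_collist (arg_collist : List Int) : Prop := arg_collist ≠ []
instance (arg_collist : List Int) : Decidable (Pre_fast_validate_collist arg_collist) := by unfold Pre_fast_validate_collist; infer_instance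
def pvWitness_fast_validate_collist : List Int := [1, 3, 2]

def Spec_fast_validate_collist (arg_collist : List Int) (out : Bool) : Prop := out = fast_validate_collist_alt arg_collist
instance (arg_collist : List Int) (out : Bool) : Decidable (Spec_fast_validate_collist arg_collist out) := by unfold Spec_fast_validate_collist; infer_instance

-- ===== CLAIM (what is proved, stated in full; the proofs are below) =====
def Claim_equal_fast_validate_collist : Prop := ∀ (arg_collist : List Int), Dom_fast_validate_collist arg_collist → Pre_fast_validate_collist arg_collist → Spec_fast_validate_collist arg_collist (fast_validate_collist arg_collist)

-- ===== LEMMAS AND PROOFS =====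

-- Under the sign-mix guard the complement loop can never hit: every complementary
-- pair would force max ≥ 0 and min < 0.
theorem pvLoopA_true (l : List Int) (mx mn : Int)
    (hmx : PySem.List.max? l (fun x => x) = some mx)
    (hmn : PySem.List.min? l (fun x => x) = some mn)
    (hns : ¬ (mx ≥ 0 ∧ mn < 0)) :
    ∀ r : List Int, (∀ p ∈ r, p ∈ l) → pvLoopA l r = true := by
  have hmax : ∀ y ∈ l, y ≤ mx := PySem.List.max?_isMax hmx
  have hmin : ∀ y ∈ l, mn ≤ y := PySem.List.min?_isMin hmn
  intro r
  induction r with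
  | nil => intro _; rfl
  | cons p rest ih =>
    intro hsub
    have hp : p ∈ l := hsub p (List.mem_cons_self ..)
    have hrest : pvLoopA l rest = true := ih (fun q hq => hsub q (List.mem_cons_of_mem _ hq))
    have hpmx : p ≤ mx := hmax p hp
    have hpmn : mn ≤ p := hmin p hp
    simp only [pvLoopA]
    by_cases h0 : p = 0
    · simp only [h0, if_true]
      have : (-99 : Int) ∉ l := by
        intro hmem
        exact hns ⟨by omega, by have := hmax _ hmem; have := hmin _ hmem; omega⟩
      simp [this, hrest]
    · by_cases h99 : p = -99
      · simp only [h99, if_true]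
        have : (0 : Int) ∉ l := by
          intro hmem
          exact hns ⟨by have := hmax _ hmem; omega, by omega⟩
        simp [this, hrest]
      · by_cases hpos : p > 0
        · have : (-p) ∉ l := by
            intro hmem
            exact hns ⟨by omega, by have := hmin _ hmem; omega⟩
          simp [h0, h99, hpos, this, hrest]
        · have hneg : p < 0 := by omega
          have : (-p) ∉ l := by
            intro hmem
            exact hns ⟨by have := hmax _ hmem; omega, by omega⟩
          simp [h0, h99, hpos, hneg, this, hrest]

-- ===== VERDICT (by name: the statement is the Claim_ definition above) =====
theorem fast_validate_collist_spec : Claim_equal_fast_validate_collist := by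
  intro l _ hpre
  unfold Spec_fast_validate_collist fast_validate_collist fast_validate_collist_alt
  by_cases hdup : l.length ≠ (PySem.Set.ofList l).length
  · simp [hdup]
  · simp only [hdup, if_false]
    cases hmx : PySem.List.max? l (fun x => x) with
    | none => exact absurd ((PySem.List.max?_eq_none_iff _ _).mp hmx) hpre
    | some mx =>
      cases hmn : PySem.List.min? l (fun x => x) with
      | none =>
        exact absurd (((PySem.List.min?_eq_none_iff _ _).mp hmn)) hpre
      | some mn =>
        by_cases hs : mx ≥ 0 ∧ mn < 0
        · simp [hs]
        · have := pvLoopA_true l mx mn hmx hmn hs l (fun _ h => h)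
          simp only [hs, if_false, this]
          push Not at hs
          by_cases h1 : mx ≥ 0
          · have := hs h1
            simp [h1, not_lt.mpr this]
          · simp [h1]
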